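-- pv_equiv track=rewrite | github.com/fantasyAlgo/InfiniteDoppelganger | server/helpers.py | columnPositionEnemy
-- ===== SOURCE A (Python) =====
-- def columnPositionEnemy(lastDir, running = -1, fighting = False, health = 10):
--     directions = [
--         (0, 32*2,  32, 32),
--         (0, 32*1,  32, 32),
--         (0, 32*0,  32, 32),
--         (0, 32*1, -32, 32),
--     ]
--     if health <= 0:
--         directions = [(el[0]+32*(running%4), el[1]+5*32, el[2], el[3]) for el in directions]
--         return directions[1 if lastDir == 0 or lastDir == 2 else 3]
--
--     if running >= 0:
--         directions = [(el[0]+32*(running%6), el[1]+3*32, el[2], el[3]) for el in directions]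
--     elif fighting:
--         directions = [(el[0]+32*(running%6), el[1]+6*32, el[2], el[3]) for el in directions]
--     return directions[lastDir]
-- ===== SOURCE B (Python) =====
-- def columnPositionEnemy(lastDir, running = -1, fighting = False, health = 10):
--     # Table-free closed form: base row y is 32*|2-i|, width flips sign only at i == 3.
--     if health <= 0:
--         i = 1 if lastDir == 0 or lastDir == 2 else 3
--         col, dy = 32 * (running % 4), 5 * 32
--     else:
--         i = lastDir % 4
--         if running >= 0:
--             col, dy = 32 * (running % 6), 3 * 32
--         elif fighting:
--             col, dy = 32 * (running % 6), 6 * 32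
--         else:
--             col, dy = 0, 0
--     return (col, 32 * abs(2 - i) + dy, -32 if i == 3 else 32, 32)
-- ===== Notes on version B (the rewrite author's own statement) =====
-- stated objective: simpler
-- what changed: B eliminates the 4-row tuple table entirely: it computes the row index i, then derives the returned tuple arithmetically as (col, 32*abs(2-i)+dy, -32 if i==3 else 32, 32), instead of building four base tuples, mapping a transform over the list and indexing into it.
import Mathlib
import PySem

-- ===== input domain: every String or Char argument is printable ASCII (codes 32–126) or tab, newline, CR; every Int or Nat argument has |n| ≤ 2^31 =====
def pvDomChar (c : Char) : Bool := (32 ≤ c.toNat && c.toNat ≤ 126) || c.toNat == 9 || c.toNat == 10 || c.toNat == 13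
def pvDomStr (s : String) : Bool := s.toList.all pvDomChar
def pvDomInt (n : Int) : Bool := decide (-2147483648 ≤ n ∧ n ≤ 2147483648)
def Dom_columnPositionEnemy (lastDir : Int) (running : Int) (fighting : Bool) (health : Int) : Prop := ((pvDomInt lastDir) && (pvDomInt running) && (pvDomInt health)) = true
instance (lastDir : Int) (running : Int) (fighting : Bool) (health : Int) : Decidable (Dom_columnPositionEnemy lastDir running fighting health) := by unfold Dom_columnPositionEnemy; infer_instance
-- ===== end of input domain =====

-- B removes the tuple table: the result is computed arithmetically from the row index (objective: simpler).

-- ===== PORT A =====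
def columnPositionEnemy (lastDir : Int) (running : Int) (fighting : Bool) (health : Int) : Int × Int × Int × Int :=
  let directions : List (Int × Int × Int × Int) :=
    [(0, 32*2, 32, 32), (0, 32*1, 32, 32), (0, 32*0, 32, 32), (0, 32*1, -32, 32)]
  if health ≤ 0 then
    let directions := directions.map (fun el =>
      (el.1 + 32 * PySem.Int.mod running 4, el.2.1 + 5*32, el.2.2.1, el.2.2.2))
    (PySem.List.pyGet? directions (if lastDir = 0 ∨ lastDir = 2 then 1 else 3)).getD (0, 0, 0, 0)
  else
    let directions :=
      if running ≥ 0 then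
        directions.map (fun el => (el.1 + 32 * PySem.Int.mod running 6, el.2.1 + 3*32, el.2.2.1, el.2.2.2))
      else if fighting then
        directions.map (fun el => (el.1 + 32 * PySem.Int.mod running 6, el.2.1 + 6*32, el.2.2.1, el.2.2.2))
      else directions
    (PySem.List.pyGet? directions lastDir).getD (0, 0, 0, 0)

-- ===== PORT B =====
def columnPositionEnemy_alt (lastDir : Int) (running : Int) (fighting : Bool) (health : Int) : Int × Int × Int × Int :=
  let (i, col, dy) : Int × Int × Int :=
    if health ≤ 0 then
      ((if lastDir = 0 ∨ lastDir = 2 then 1 else 3), 32 * PySem.Int.mod running 4, 5*32)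
    else
      let i := PySem.Int.mod lastDir 4
      if running ≥ 0 then (i, 32 * PySem.Int.mod running 6, 3*32)
      else if fighting then (i, 32 * PySem.Int.mod running 6, 6*32)
      else (i, 0, 0)
  (col, 32 * |2 - i| + dy, if i = 3 then -32 else 32, 32)

-- ===== PRECONDITION & SPEC =====
-- Pre_ excludes exactly the inputs on which A raises IndexError: lastDir outside [-4, 3] when health > 0.
def Pre_columnPositionEnemy (lastDir : Int) (running : Int) (fighting : Bool) (health : Int) : Prop :=
  health ≤ 0 ∨ (-4 ≤ lastDir ∧ lastDir ≤ 3)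
instance (lastDir : Int) (running : Int) (fighting : Bool) (health : Int) : Decidable (Pre_columnPositionEnemy lastDir running fighting health) := by unfold Pre_columnPositionEnemy; infer_instance

def pvWitness_columnPositionEnemy : Int × Int × Bool × Int := (2, 5, false, 10)


def Spec_columnPositionEnemy (lastDir : Int) (running : Int) (fighting : Bool) (health : Int) (out : Int × Int × Int × Int) : Prop := out = columnPositionEnemy_alt lastDir running fighting health
instance (lastDir : Int) (running : Int) (fighting : Bool) (health : Int) (out : Int × Int × Int × Int) : Decidable (Spec_columnPositionEnemy lastDir running fighting health out) := by unfold Spec_columnPositionEnemy; infer_instance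

-- ===== CLAIM (what is proved, stated in full; the proofs are below) =====
def Claim_equal_columnPositionEnemy : Prop := ∀ (lastDir : Int) (running : Int) (fighting : Bool) (health : Int), Dom_columnPositionEnemy lastDir running fighting health → Pre_columnPositionEnemy lastDir running fighting health → Spec_columnPositionEnemy lastDir running fighting health (columnPositionEnemy lastDir running fighting health)


-- ===== LEMMAS AND PROOFS =====

-- ===== VERDICT (by name: the statement is the Claim_ definition above) =====
theorem columnPositionEnemy_spec : Claim_equal_columnPositionEnemy := by
  intro lastDir running fighting health _ hpre
  unfold Spec_columnPositionEnemy columnPositionEnemy columnPositionEnemy_alt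
  by_cases h0 : health ≤ 0
  · simp only [h0, if_true]
    split_ifs <;> simp_all [PySem.List.pyGet?, PySem.List.pyIdx?]
  · obtain ⟨h1, h2⟩ : -4 ≤ lastDir ∧ lastDir ≤ 3 := hpre.resolve_left h0
    simp only [h0, if_false]
    interval_cases lastDir <;>
      split_ifs <;>
        simp_all [PySem.List.pyGet?, PySem.List.pyIdx?,
          (by decide : PySem.Int.mod (-4 : Int) 4 = 0),
          (by decide : PySem.Int.mod (-3 : Int) 4 = 1),
          (by decide : PySem.Int.mod (-2 : Int) 4 = 2),
          (by decide : PySem.Int.mod (-1 : Int) 4 = 3),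
          (by decide : PySem.Int.mod (0 : Int) 4 = 0),
          (by decide : PySem.Int.mod (1 : Int) 4 = 1),
          (by decide : PySem.Int.mod (2 : Int) 4 = 2),
          (by decide : PySem.Int.mod (3 : Int) 4 = 3)]
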